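-- pv_equiv track=rewrite | github.com/bandiatindra/DataStructures-and-Algorithms | Week 3/Car Fueling.py | get_minimum_refills
-- ===== SOURCE A (Python) =====
-- def get_minimum_refills(distance,tank,n,stops):
--
--     curr_fill = 0
--     num_refill = 0
--     stops.append(distance)
--     stops.insert(0,0)
--
--     while curr_fill <= n :
--         last_refill = curr_fill
--
--         while (curr_fill <= n and (stops[curr_fill + 1] - stops[last_refill]) <= tank):
--             curr_fill = curr_fill + 1
--         if curr_fill == last_refill :
--             return -1
--         if curr_fill <= n:
--             num_refill = num_refill + 1
--     return num_refill
-- ===== SOURCE B (Python) =====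
-- def get_minimum_refills(distance, tank, n, stops):
--     # same in-place mutation as A
--     stops.append(distance)
--     stops.insert(0, 0)
--     # stage 1: jump table. nxt[j] = the first index c in [j, n] whose successor
--     # stop is out of tank range from stop j, or n + 1 if no such index exists.
--     nxt = [next((c for c in range(j, n + 1) if stops[c + 1] - stops[j] > tank), n + 1)
--            for j in range(n + 1)]
--     # stage 2: chase the jump pointers from the start, counting refills
--     j = 0
--     count = 0
--     while j <= n:
--         c = nxt[j]
--         if c == j:
--             return -1
--         if c > n:
--             return count
--         count += 1
--         j = c
--     return count
-- ===== Notes on version B (the rewrite author's own statement) =====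
-- stated objective: alternative
-- what changed: Replaces A's on-line nested two-pointer while-loops with two staged passes: first precompute a jump table nxt[j] (first index whose successor stop is out of tank range from stop j), then chase the jump pointers from the start counting refills.
-- outside the precondition, e.g. on get_minimum_refills(8, 1, 5, []): A returns -1, B raises IndexError
import Mathlib
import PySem

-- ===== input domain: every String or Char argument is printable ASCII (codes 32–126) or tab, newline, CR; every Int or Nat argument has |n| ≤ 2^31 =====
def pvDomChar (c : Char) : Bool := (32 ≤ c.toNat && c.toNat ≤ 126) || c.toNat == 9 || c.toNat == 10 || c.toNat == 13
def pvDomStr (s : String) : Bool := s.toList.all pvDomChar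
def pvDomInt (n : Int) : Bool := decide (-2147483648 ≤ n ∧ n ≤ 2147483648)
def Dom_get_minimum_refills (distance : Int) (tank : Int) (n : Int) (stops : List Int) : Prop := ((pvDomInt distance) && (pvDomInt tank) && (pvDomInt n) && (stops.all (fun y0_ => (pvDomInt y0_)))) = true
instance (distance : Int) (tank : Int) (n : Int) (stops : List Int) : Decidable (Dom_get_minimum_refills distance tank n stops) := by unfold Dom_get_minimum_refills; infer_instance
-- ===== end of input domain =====

-- B replaces A's on-line nested two-pointer while-loops by two staged passes: a
-- precomputed jump table plus a pointer chase (objective: alternative decomposition).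
-- Both A and B mutate `stops` in place identically (append distance, insert 0 at the
-- front); the equivalence proved here is about the return value.

-- ===== PORT A =====
-- list indexing stops[i]: inside Pre_ every access is in range; out of range Python
-- raises IndexError (excluded by Pre_), the port returns a default there.
def pvGetD (xs : List Int) (i : Int) : Int := PySem.List.pyGetD xs i 0

-- A's inner while loop: advance curr_fill while reachable from last_refill
def aInner (stops2 : List Int) (tank : Int) (n : Int) (last : Int) (cf : Int) : Int :=
  if cf ≤ n ∧ pvGetD stops2 (cf + 1) - pvGetD stops2 last ≤ tank then
    aInner stops2 tank n last (cf + 1)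
  else cf
termination_by (n + 1 - cf).toNat
decreasing_by omega

-- the inner loop only moves curr_fill forward (cited by aOuter's decreasing_by)
theorem aInner_ge (stops2 : List Int) (tank : Int) (n : Int) (last : Int) (cf : Int) :
    cf ≤ aInner stops2 tank n last cf := by
  fun_induction aInner stops2 tank n last cf with
  | case1 _ ih => omega
  | case2 => omega

-- A's outer while loop
def aOuter (stops2 : List Int) (tank : Int) (n : Int) (cf : Int) (num : Int) : Int :=
  if cf ≤ n then
    if aInner stops2 tank n cf cf = cf then -1
    else if aInner stops2 tank n cf cf ≤ n then
      aOuter stops2 tank n (aInner stops2 tank n cf cf) (num + 1)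
    else num
  else num
termination_by (n + 1 - cf).toNat
decreasing_by
  have := aInner_ge stops2 tank n cf cf
  omega

def get_minimum_refills (distance : Int) (tank : Int) (n : Int) (stops : List Int) : Int :=
  aOuter (0 :: (stops ++ [distance])) tank n 0 0

-- ===== PORT B =====
-- stage 1: the jump table, entry j = next((c for c in range(j, n+1) if …), n+1)
def bNxtEntry (stops2 : List Int) (tank : Int) (n : Int) (j : Int) : Int :=
  ((PySem.List.pyRange j (n + 1) 1).find?
      (fun c => decide (tank < pvGetD stops2 (c + 1) - pvGetD stops2 j))).getD (n + 1)

def bMkNxt (stops2 : List Int) (tank : Int) (n : Int) : List Int :=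
  (PySem.List.pyRange 0 (n + 1) 1).map (bNxtEntry stops2 tank n)

-- every table entry points at or beyond its own index (cited by bChase's termination proof)
theorem bMkNxt_ge (stops2 : List Int) (tank : Int) (n : Int) (k : Int)
    (hk0 : 0 ≤ k) (hkn : k ≤ n) : k ≤ pvGetD (bMkNxt stops2 tank n) k := by
  unfold bMkNxt pvGetD
  rw [PySem.List.pyGetD_map_pyRange_of_nonneg _ _ _ _ hk0 (by omega)]
  unfold bNxtEntry
  cases hf : (PySem.List.pyRange k (n + 1) 1).find?
      (fun c => decide (tank < pvGetD stops2 (c + 1) - pvGetD stops2 k)) with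
  | none => simp; omega
  | some c =>
    have hm := List.mem_of_find?_eq_some hf
    rw [PySem.List.mem_pyRange_one] at hm
    simpa using hm.1

-- stage 2: chase the jump pointers (the `h`/`hj` arguments only justify termination)
def bChase (nxt : List Int) (n : Int)
    (h : ∀ k, 0 ≤ k → k ≤ n → k ≤ pvGetD nxt k) (j : Int) (count : Int)
    (hj : 0 ≤ j) : Int :=
  if hjn : j ≤ n then
    if pvGetD nxt j = j then -1
    else if n < pvGetD nxt j then count
    else bChase nxt n h (pvGetD nxt j) (count + 1) (by have := h j hj hjn; omega)
  else count
termination_by (n + 1 - j).toNat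
decreasing_by have := h j hj hjn; omega

def get_minimum_refills_alt (distance : Int) (tank : Int) (n : Int) (stops : List Int) : Int :=
  bChase (bMkNxt (0 :: (stops ++ [distance])) tank n) n
    (bMkNxt_ge (0 :: (stops ++ [distance])) tank n) 0 0 (by omega)

-- ===== PRECONDITION & SPEC =====
-- Pre_ excludes n > len(stops), where both programs' access stops[c+1] can run past the
-- mutated list and raise IndexError; on some such inputs A still returns -1 before the
-- overread (cited in claim.json) while B's table precomputation raises.
def Pre_get_minimum_refills (distance : Int) (tank : Int) (n : Int) (stops : List Int) : Prop :=
  n ≤ (stops.length : Int)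
instance (distance : Int) (tank : Int) (n : Int) (stops : List Int) : Decidable (Pre_get_minimum_refills distance tank n stops) := by unfold Pre_get_minimum_refills; infer_instance

def pvWitness_get_minimum_refills : Int × Int × Int × List Int := (10, 4, 2, [3, 6])

def Spec_get_minimum_refills (distance : Int) (tank : Int) (n : Int) (stops : List Int) (out : Int) : Prop := out = get_minimum_refills_alt distance tank n stops
instance (distance : Int) (tank : Int) (n : Int) (stops : List Int) (out : Int) : Decidable (Spec_get_minimum_refills distance tank n stops out) := by unfold Spec_get_minimum_refills; infer_instance

-- ===== CLAIM (what is proved, stated in full; the proofs are below) =====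
def Claim_equal_get_minimum_refills : Prop := ∀ (distance : Int) (tank : Int) (n : Int) (stops : List Int), Dom_get_minimum_refills distance tank n stops → Pre_get_minimum_refills distance tank n stops → Spec_get_minimum_refills distance tank n stops (get_minimum_refills distance tank n stops)

-- ===== LEMMAS AND PROOFS =====

-- A's inner scan from cf computes exactly B's "first failing index" search
theorem aInner_eq_find (stops2 : List Int) (tank : Int) (n : Int) (j : Int) (cf : Int)
    (hcf : cf ≤ n + 1) :
    aInner stops2 tank n j cf =
      ((PySem.List.pyRange cf (n + 1) 1).find?
          (fun c => decide (tank < pvGetD stops2 (c + 1) - pvGetD stops2 j))).getD (n + 1) := by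
  fun_induction aInner stops2 tank n j cf with
  | case1 cf hcond ih =>
    rw [PySem.List.pyRange_one_cons (by omega)]
    rw [List.find?_cons_of_neg (by simpa using hcond.2)]
    exact ih (by omega)
  | case2 cf hcond =>
    by_cases hn : cf ≤ n
    · rw [PySem.List.pyRange_one_cons (by omega)]
      rw [List.find?_cons_of_pos (by simp; omega)]
      simp
    · rw [PySem.List.pyRange_one_eq_nil (by omega)]
      simp; omega

-- the table entry at j (0 ≤ j ≤ n) equals A's inner scan from j
theorem nxt_eq_aInner (stops2 : List Int) (tank : Int) (n : Int) (j : Int)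
    (hj0 : 0 ≤ j) (hjn : j ≤ n) :
    pvGetD (bMkNxt stops2 tank n) j = aInner stops2 tank n j j := by
  unfold bMkNxt pvGetD
  rw [PySem.List.pyGetD_map_pyRange_of_nonneg _ _ _ _ hj0 (by omega)]
  unfold bNxtEntry
  rw [aInner_eq_find stops2 tank n j j (by omega)]

-- B's pointer chase simulates A's outer loop step for step
theorem bChase_eq_aOuter (stops2 : List Int) (tank : Int) (n : Int)
    (h : ∀ k, 0 ≤ k → k ≤ n → k ≤ pvGetD (bMkNxt stops2 tank n) k)
    (j count : Int) (hj : 0 ≤ j) :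
    bChase (bMkNxt stops2 tank n) n h j count hj = aOuter stops2 tank n j count := by
  fun_induction bChase (bMkNxt stops2 tank n) n h j count hj with
  | case1 j count hj hjn heq =>
    rw [aOuter, if_pos hjn, if_pos (by rw [← nxt_eq_aInner stops2 tank n j hj hjn]; exact heq)]
  | case2 j count hj hjn hne hgt =>
    rw [aOuter, if_pos hjn,
      if_neg (by rw [← nxt_eq_aInner stops2 tank n j hj hjn]; exact hne),
      if_neg (by rw [← nxt_eq_aInner stops2 tank n j hj hjn]; omega)]
  | case3 j count hj hjn hne hle ih =>
    rw [aOuter, if_pos hjn,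
      if_neg (by rw [← nxt_eq_aInner stops2 tank n j hj hjn]; exact hne),
      if_pos (by rw [← nxt_eq_aInner stops2 tank n j hj hjn]; omega), ih,
      nxt_eq_aInner stops2 tank n j hj hjn]
  | case4 j count hj hjn =>
    rw [aOuter, if_neg hjn]

-- ===== VERDICT (by name: the statement is the Claim_ definition above) =====
theorem get_minimum_refills_spec : Claim_equal_get_minimum_refills := by
  intro distance tank n stops _ _
  unfold Spec_get_minimum_refills get_minimum_refills get_minimum_refills_alt
  exact (bChase_eq_aOuter _ _ _ _ 0 0 (by omega)).symm
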